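-- pv_equiv track=rewrite | github.com/AdiAmuzig/Cracking-the-Coding-Interview | trie_build.py | genorateBoolGrid
-- ===== SOURCE A (Python) =====
-- def genorateBoolGrid(r: int, c: int, off_limits: list[list[int]]) -> list[list[bool]]:
--     bool_grid = [[False] * (c + 1) for _ in range(r + 1)]
--     bool_grid[r - 1][c - 1] = True
--     off_limits_dict = dict()
--     for off_limit in off_limits:
--         off_limits_dict[(off_limit[0], off_limit[1])] = 1
--
--     for i in range(r - 1, -1, -1):
--         for j in range(c - 1, -1, -1):
--             if ((i, j) not in off_limits_dict) and (bool_grid[i + 1][j] or bool_grid[i][j + 1]):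
--                 bool_grid[i][j] = True
--
--     return bool_grid
-- ===== SOURCE B (Python) =====
-- def genorateBoolGrid(r: int, c: int, off_limits: list[list[int]]) -> list[list[bool]]:
--     off = {(o[0], o[1]) for o in off_limits}
--     seen = set()
--     if r > 0 and c > 0:
--         dest = (r - 1, c - 1)
--         seen.add(dest)
--         stack = [dest]
--         while stack:
--             i, j = stack.pop()
--             for p in ((i - 1, j), (i, j - 1)):
--                 if p[0] >= 0 and p[1] >= 0 and p not in off and p not in seen:
--                     seen.add(p)
--                     stack.append(p)
--     return [[(i, j) in seen for j in range(c)] + [False]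
--             for i in range(r)] + [[False] * (c + 1)]
-- ===== Notes on version B (the rewrite author's own statement) =====
-- stated objective: alternative
-- what changed: A sweeps every cell of a padded (r+1)x(c+1) grid bottom-up, mutating it in place with a dict of blocked cells; B instead runs a worklist reachability search (DFS with an explicit stack and a seen set) backwards from the destination, marking only cells that are actually reachable, and builds the output grid once at the end from the seen set.
-- intended difference: On degenerate grids with r=0 or c=0 (no real cells) A still returns a grid with one True cell because its seed write bool_grid[r-1][c-1] wraps around via Python negative indexing into the padding row/column, while B returns the intended all-False grid. — e.g. on genorateBoolGrid(0, 1, []): A returns [[true, false]], B returns [[false, false]]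
import Mathlib
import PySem

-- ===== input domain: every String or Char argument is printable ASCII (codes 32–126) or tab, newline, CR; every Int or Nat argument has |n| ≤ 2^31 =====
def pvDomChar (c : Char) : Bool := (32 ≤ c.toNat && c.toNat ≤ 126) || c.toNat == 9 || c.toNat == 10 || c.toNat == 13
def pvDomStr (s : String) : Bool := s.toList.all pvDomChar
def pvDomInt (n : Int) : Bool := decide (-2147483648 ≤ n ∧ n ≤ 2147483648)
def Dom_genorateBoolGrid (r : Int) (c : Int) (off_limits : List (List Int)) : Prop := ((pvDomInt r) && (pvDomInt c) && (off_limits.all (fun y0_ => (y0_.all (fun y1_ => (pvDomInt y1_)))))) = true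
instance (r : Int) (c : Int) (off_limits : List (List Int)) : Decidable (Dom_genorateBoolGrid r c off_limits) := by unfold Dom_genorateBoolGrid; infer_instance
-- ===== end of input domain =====

-- B replaces A's exhaustive bottom-up sweep over every cell of the padded grid by a
-- worklist reachability search (DFS with an explicit stack and a seen set) backwards
-- from the destination, building the grid once at the end; same worst-case cost
-- ("alternative").

-- ===== PORT A =====
-- literal transliteration of A; pyGetD/pySetD are exact wherever the Python indexing
-- does not raise (Pre_ excludes the raising inputs)
def genorateBoolGrid (r : Int) (c : Int) (off_limits : List (List Int)) : List (List Bool) :=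
  let bool_grid : List (List Bool) :=
    (PySem.List.pyRange 0 (r + 1) 1).map (fun _ => PySem.List.pyRepeat [false] (c + 1))
  -- bool_grid[r - 1][c - 1] = True
  let bool_grid :=
    PySem.List.pySetD bool_grid (r - 1)
      (PySem.List.pySetD (PySem.List.pyGetD bool_grid (r - 1) []) (c - 1) true)
  -- off_limits_dict[(off_limit[0], off_limit[1])] = 1
  let off_limits_dict : PySem.Dict (Int × Int) Int :=
    off_limits.foldl
      (fun d ol => d.insert (PySem.List.pyGetD ol 0 0, PySem.List.pyGetD ol 1 0) 1)
      PySem.Dict.empty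
  (PySem.List.pyRange (r - 1) (-1) (-1)).foldl (fun g i =>
    (PySem.List.pyRange (c - 1) (-1) (-1)).foldl (fun g j =>
      if (!off_limits_dict.contains (i, j))
          && (PySem.List.pyGetD (PySem.List.pyGetD g (i + 1) []) j false
              || PySem.List.pyGetD (PySem.List.pyGetD g i []) (j + 1) false) then
        PySem.List.pySetD g i (PySem.List.pySetD (PySem.List.pyGetD g i []) j true)
      else g) g) bool_grid

-- ===== PORT B =====
-- literal transliteration of Source B: a DFS worklist from the destination.
-- the body of "for p in ((i-1,j),(i,j-1)): if …: seen.add(p); stack.append(p)"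
def pvVisit (off : PySem.Set (Int × Int))
    (ss : PySem.Set (Int × Int) × List (Int × Int)) (p : Int × Int) :
    PySem.Set (Int × Int) × List (Int × Int) :=
  if decide (0 ≤ p.1) && decide (0 ≤ p.2) && !off.contains p && !ss.1.contains p then
    (PySem.Set.add ss.1 p, ss.2 ++ [p])
  else ss

-- "while stack: i, j = stack.pop(); for p in …": the fuel only makes the loop total;
-- fuel r.toNat * c.toNat is proved sufficient below (the loop pops at most r*c times)
def pvDfs (off : PySem.Set (Int × Int)) :
    ℕ → PySem.Set (Int × Int) → List (Int × Int) → PySem.Set (Int × Int)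
  | 0, seen, _ => seen
  | fuel + 1, seen, stack =>
    match stack.getLast? with
    | none => seen
    | some ij =>
      let ss := [(ij.1 - 1, ij.2), (ij.1, ij.2 - 1)].foldl (pvVisit off) (seen, stack.dropLast)
      pvDfs off fuel ss.1 ss.2

def genorateBoolGrid_alt (r : Int) (c : Int) (off_limits : List (List Int)) : List (List Bool) :=
  let off : PySem.Set (Int × Int) :=
    PySem.Set.ofList
      (off_limits.map (fun o => (PySem.List.pyGetD o 0 0, PySem.List.pyGetD o 1 0)))
  let seen : PySem.Set (Int × Int) :=
    if 0 < r ∧ 0 < c then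
      pvDfs off (r.toNat * c.toNat)
        (PySem.Set.add PySem.Set.empty (r - 1, c - 1)) [(r - 1, c - 1)]
    else PySem.Set.empty
  ((PySem.List.pyRange 0 r 1).map (fun i =>
      ((PySem.List.pyRange 0 c 1).map (fun j => seen.contains (i, j))) ++ [false]))
    ++ [PySem.List.pyRepeat [false] (c + 1)]

-- ===== PRECONDITION & SPEC =====
-- Pre_ excludes exactly the inputs where the Python A raises IndexError: a negative r
-- (empty grid) or negative c (empty rows) and off-limit entries with fewer than 2 coordinates.
def Pre_genorateBoolGrid (r : Int) (c : Int) (off_limits : List (List Int)) : Prop :=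
  0 ≤ r ∧ 0 ≤ c ∧ ∀ ol ∈ off_limits, 2 ≤ ol.length
instance (r : Int) (c : Int) (off_limits : List (List Int)) : Decidable (Pre_genorateBoolGrid r c off_limits) := by unfold Pre_genorateBoolGrid; infer_instance
def pvWitness_genorateBoolGrid : Int × Int × List (List Int) := (2, 2, [[0, 1]])

-- On the degenerate grids with r = 0 or c = 0 (no real cells) A still marks one cell True
-- because its seed write bool_grid[r-1][c-1] wraps around via Python negative indexing into
-- the padding, while B returns the intended all-False grid.
def D_genorateBoolGrid (r : Int) (c : Int) (off_limits : List (List Int)) : Prop :=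
  r = 0 ∨ c = 0
instance (r : Int) (c : Int) (off_limits : List (List Int)) : Decidable (D_genorateBoolGrid r c off_limits) := by unfold D_genorateBoolGrid; infer_instance

def Spec_genorateBoolGrid (r : Int) (c : Int) (off_limits : List (List Int)) (out : List (List Bool)) : Prop := ¬ D_genorateBoolGrid r c off_limits → out = genorateBoolGrid_alt r c off_limits
instance (r : Int) (c : Int) (off_limits : List (List Int)) (out : List (List Bool)) : Decidable (Spec_genorateBoolGrid r c off_limits out) := by unfold Spec_genorateBoolGrid; infer_instance

def pvDiffWitness_genorateBoolGrid : Int × Int × List (List Int) := (0, 1, [])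
def pvDiffWitnessOut_genorateBoolGrid : (List (List Bool)) × (List (List Bool)) :=
  ([[true, false]], [[false, false]])

-- ===== CLAIM (what is proved, stated in full; the proofs are below) =====
def Claim_unchanged_genorateBoolGrid : Prop := ∀ (r : Int) (c : Int) (off_limits : List (List Int)), Dom_genorateBoolGrid r c off_limits → Pre_genorateBoolGrid r c off_limits → Spec_genorateBoolGrid r c off_limits (genorateBoolGrid r c off_limits)
def Claim_changed_genorateBoolGrid : Prop := Dom_genorateBoolGrid (pvDiffWitness_genorateBoolGrid.1) (pvDiffWitness_genorateBoolGrid.2.1) (pvDiffWitness_genorateBoolGrid.2.2) ∧ Pre_genorateBoolGrid (pvDiffWitness_genorateBoolGrid.1) (pvDiffWitness_genorateBoolGrid.2.1) (pvDiffWitness_genorateBoolGrid.2.2) ∧ D_genorateBoolGrid (pvDiffWitness_genorateBoolGrid.1) (pvDiffWitness_genorateBoolGrid.2.1) (pvDiffWitness_genorateBoolGrid.2.2) ∧ genorateBoolGrid (pvDiffWitness_genorateBoolGrid.1) (pvDiffWitness_genorateBoolGrid.2.1) (pvDiffWitness_genorateBoolGrid.2.2) = pvDiffWitnessOut_genorateBoolGrid.1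 ∧ genorateBoolGrid_alt (pvDiffWitness_genorateBoolGrid.1) (pvDiffWitness_genorateBoolGrid.2.1) (pvDiffWitness_genorateBoolGrid.2.2) = pvDiffWitnessOut_genorateBoolGrid.2 ∧ pvDiffWitnessOut_genorateBoolGrid.1 ≠ pvDiffWitnessOut_genorateBoolGrid.2
def Claim_exact_genorateBoolGrid : Prop := ∀ (r : Int) (c : Int) (off_limits : List (List Int)), Dom_genorateBoolGrid r c off_limits → Pre_genorateBoolGrid r c off_limits → D_genorateBoolGrid r c off_limits → genorateBoolGrid r c off_limits ≠ genorateBoolGrid_alt r c off_limits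

-- ===== LEMMAS AND PROOFS =====

-- the recurrence A computes: a real cell (i, j) of the R×C grid is True iff it is the
-- seeded destination (R-1, C-1), or it is not off-limits and the cell below or to the
-- right is True; everything outside the real cells is False
def gridSpec (R C : ℕ) (P : Int → Int → Bool) (i j : ℕ) : Bool :=
  if h : i < R ∧ j < C then
    if i = R - 1 ∧ j = C - 1 then true
    else !P i j && (gridSpec R C P (i + 1) j || gridSpec R C P i (j + 1))
  else false
termination_by (R - i) + (C - j)
decreasing_by all_goals omega

def keyOf (o : List Int) : Int × Int := (PySem.List.pyGetD o 0 0, PySem.List.pyGetD o 1 0)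
def Pf (off_limits : List (List Int)) : Int → Int → Bool :=
  fun a b => decide ((a, b) ∈ off_limits.map keyOf)
def Tf (R C : ℕ) (F : ℕ → ℕ → Bool) : List (List Bool) :=
  (List.range (R + 1)).map (fun i => (List.range (C + 1)).map (fun j => F i j))

theorem rmap_getD {α : Type} (n k : ℕ) (h : ℕ → α) (d : α) (hk : k < n) :
    ((List.range n).map h).getD k d = h k := by
  rw [List.getD_eq_getElem _ _ (by simpa using hk)]; simp

theorem rmap_set {α : Type} (n k : ℕ) (hk : k < n) (h : ℕ → α) (x : α) :
    ((List.range n).map h).set k x = (List.range n).map (fun i => if i = k then x else h i) := by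
  apply List.ext_getElem
  · simp
  · intro i h1 h2
    simp only [List.getElem_set, List.getElem_map, List.getElem_range]
    by_cases hik : k = i <;> simp [hik] <;> intro h3 <;> omega

theorem rmap_congr {α : Type} (n : ℕ) (h h' : ℕ → α) (H : ∀ i < n, h i = h' i) :
    (List.range n).map h = (List.range n).map h' := by
  apply List.map_congr_left; intro i hi; exact H i (List.mem_range.mp hi)

theorem gs_false_row {R C : ℕ} {P : Int → Int → Bool} {i j : ℕ} (h : R ≤ i) :
    gridSpec R C P i j = false := by
  rw [gridSpec]; simp; omega

theorem gs_false_col {R C : ℕ} {P : Int → Int → Bool} {i j : ℕ} (h : C ≤ j) :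
    gridSpec R C P i j = false := by
  rw [gridSpec]; simp; omega

theorem gs_seed {R C : ℕ} {P : Int → Int → Bool} (hR : 1 ≤ R) (hC : 1 ≤ C) :
    gridSpec R C P (R - 1) (C - 1) = true := by
  rw [gridSpec]; simp; omega

theorem gs_step {R C : ℕ} {P : Int → Int → Bool} {i j : ℕ} (hi : i < R) (hj : j < C)
    (hns : ¬(i = R - 1 ∧ j = C - 1)) :
    gridSpec R C P i j = (!P i j && (gridSpec R C P (i + 1) j || gridSpec R C P i (j + 1))) := by
  rw [gridSpec]
  simp only [dif_pos (And.intro hi hj), if_neg hns]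

theorem Tf_row {R C : ℕ} {F : ℕ → ℕ → Bool} {i : ℕ} (hi : i < R + 1) :
    PySem.List.pyGetD (Tf R C F) (i : Int) [] = (List.range (C + 1)).map (fun j => F i j) := by
  rw [PySem.List.pyGetD_natCast, Tf, rmap_getD _ _ _ _ hi]

theorem Tf_read {R C : ℕ} {F : ℕ → ℕ → Bool} {i j : ℕ} (hi : i < R + 1) (hj : j < C + 1) :
    PySem.List.pyGetD (PySem.List.pyGetD (Tf R C F) (i : Int) []) (j : Int) false = F i j := by
  rw [Tf_row hi, PySem.List.pyGetD_natCast, rmap_getD _ _ _ _ hj]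

theorem Tf_congr {R C : ℕ} {F F' : ℕ → ℕ → Bool}
    (H : ∀ i < R + 1, ∀ j < C + 1, F i j = F' i j) : Tf R C F = Tf R C F' := by
  apply rmap_congr; intro i hi
  apply rmap_congr; intro j hj
  exact H i hi j hj

theorem Tf_write {R C : ℕ} {F : ℕ → ℕ → Bool} {i j : ℕ} (hi : i < R + 1) (hj : j < C + 1) :
    PySem.List.pySetD (Tf R C F) (i : Int)
      (PySem.List.pySetD (PySem.List.pyGetD (Tf R C F) (i : Int) []) (j : Int) true)
      = Tf R C (fun i' j' => if i' = i ∧ j' = j then true else F i' j') := by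
  rw [Tf_row hi, PySem.List.pySetD_natCast, PySem.List.pySetD_natCast,
    rmap_set _ _ hj, Tf, rmap_set _ _ hi]
  apply rmap_congr; intro i' hi'
  by_cases hii : i' = i
  · subst hii
    rw [if_pos rfl]
    apply rmap_congr; intro j' hj'
    by_cases hjj : j' = j <;> simp [hjj]
  · simp only [if_neg hii]
    apply rmap_congr; intro j' hj'
    simp [hii]

theorem pyRange_countdown (n : ℕ) :
    PySem.List.pyRange ((n : Int) - 1) (-1) (-1)
      = (List.range n).map (fun t => ((n - 1 - t : ℕ) : Int)) := by
  rw [PySem.List.pyRange_neg_one]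
  have h1 : ((n : Int) - 1 - (-1)).toNat = n := by omega
  rw [h1]
  apply rmap_congr; intro t ht
  omega

-- ==== A-side inner loop ====
def updA (R C : ℕ) (P : Int → Int → Bool) (f : ℕ → ℕ → Bool) (i m : ℕ) : ℕ → ℕ → Bool :=
  fun i' j => if i' = i ∧ C - m ≤ j then gridSpec R C P i' j else f i' j

theorem A_inner (R C : ℕ) (P : Int → Int → Bool) (hC : 1 ≤ C) (i : ℕ) (hi : i < R)
    (f : ℕ → ℕ → Bool)
    (hb : ∀ j < C, f (i + 1) j = gridSpec R C P (i + 1) j)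
    (hr : ∀ j ≤ C, f i j = decide (i = R - 1 ∧ j = C - 1)) :
    ∀ m ≤ C,
      ((List.range m).map (fun t => ((C - 1 - t : ℕ) : Int))).foldl (fun g j =>
        if (!P i j)
            && (PySem.List.pyGetD (PySem.List.pyGetD g ((i : Int) + 1) []) j false
                || PySem.List.pyGetD (PySem.List.pyGetD g (i : Int) []) (j + 1) false) then
          PySem.List.pySetD g (i : Int) (PySem.List.pySetD (PySem.List.pyGetD g (i : Int) []) j true)
        else g) (Tf R C f)
      = Tf R C (updA R C P f i m) := by
  intro m
  induction m with
  | zero =>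
    intro _
    simp only [List.range_zero, List.map_nil, List.foldl_nil]
    apply Tf_congr; intro i' hi' j hj
    unfold updA
    split_ifs with h1
    · obtain ⟨rfl, hCj⟩ := h1
      rw [hr j (by omega), gs_false_col (by omega)]
      exact decide_eq_false (by omega)
    · rfl
  | succ m ih =>
    intro hm
    have hmC : m < C := by omega
    rw [List.range_succ, List.map_append, List.foldl_append, ih (by omega)]
    simp only [List.map_cons, List.map_nil, List.foldl_cons, List.foldl_nil]
    have hj : C - 1 - m < C := by omega
    have hcast : ((C - 1 - m : ℕ) : Int) + 1 = ((C - m : ℕ) : Int) := by omega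
    have hicast : ((i : ℕ) : Int) + 1 = ((i + 1 : ℕ) : Int) := by omega
    have read1 : PySem.List.pyGetD (PySem.List.pyGetD (Tf R C (updA R C P f i m)) ((i : Int) + 1) [])
        ((C - 1 - m : ℕ) : Int) false = gridSpec R C P (i + 1) (C - 1 - m) := by
      rw [hicast, Tf_read (by omega) (by omega)]
      unfold updA
      rw [if_neg (by omega)]
      exact hb _ hj
    have read2 : PySem.List.pyGetD (PySem.List.pyGetD (Tf R C (updA R C P f i m)) (i : Int) [])
        (((C - 1 - m : ℕ) : Int) + 1) false = gridSpec R C P i (C - m) := by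
      rw [hcast, Tf_read (by omega) (by omega)]
      unfold updA
      rw [if_pos (by omega)]
    rw [read1, read2]
    have hsucc : C - 1 - m + 1 = C - m := by omega
    have hGstep : ¬(i = R - 1 ∧ C - 1 - m = C - 1) →
        gridSpec R C P i (C - 1 - m)
          = (!P (i : Int) ((C - 1 - m : ℕ) : Int)
              && (gridSpec R C P (i + 1) (C - 1 - m) || gridSpec R C P i (C - m))) := by
      intro hns
      rw [gs_step hi hj hns, hsucc]
    by_cases hcond :
        (!P (i : Int) ((C - 1 - m : ℕ) : Int)
          && (gridSpec R C P (i + 1) (C - 1 - m) || gridSpec R C P i (C - m))) = true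
    · rw [if_pos hcond, Tf_write (by omega) (by omega)]
      apply Tf_congr; intro i' hi' j' hj'
      unfold updA
      split_ifs with h1 h2 h2
      · -- newly written cell: show gridSpec is true there
        rw [h1.1, h1.2]
        by_cases hns : i = R - 1 ∧ C - 1 - m = C - 1
        · rw [hns.1, hns.2, gs_seed (by omega) hC]
        · rw [hGstep hns, hcond]
      · omega
      · rfl
      · omega
      · omega
      · rfl
    · rw [if_neg hcond]
      apply Tf_congr; intro i' hi' j' hj'
      unfold updA
      split_ifs with h1 h2 h2
      · rfl
      · omega
      · -- the one new cell (i, C-1-m), not written: its old value f equals gridSpec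
        have h5 := h2.1
        have hj2 : j' = C - 1 - m := by omega
        rw [h5, hj2, hr _ (by omega)]
        by_cases hns : i = R - 1 ∧ C - 1 - m = C - 1
        · rw [hns.1, hns.2, gs_seed (by omega) hC]
          exact decide_eq_true ⟨rfl, rfl⟩
        · rw [hGstep hns]
          simp only [Bool.not_eq_true] at hcond
          rw [hcond]
          exact decide_eq_false hns
      · rfl

def initA (R C : ℕ) : ℕ → ℕ → Bool := fun i j => decide (i = R - 1 ∧ j = C - 1)
def FkA (R C : ℕ) (P : Int → Int → Bool) (k : ℕ) : ℕ → ℕ → Bool :=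
  fun i j => if R - k ≤ i then gridSpec R C P i j else initA R C i j

theorem A_outer (R C : ℕ) (P : Int → Int → Bool) (hR : 1 ≤ R) (hC : 1 ≤ C) :
    ∀ k ≤ R,
      ((List.range k).map (fun t => ((R - 1 - t : ℕ) : Int))).foldl (fun g i =>
        ((List.range C).map (fun t => ((C - 1 - t : ℕ) : Int))).foldl (fun g j =>
          if (!P i j)
              && (PySem.List.pyGetD (PySem.List.pyGetD g (i + 1) []) j false
                  || PySem.List.pyGetD (PySem.List.pyGetD g i []) (j + 1) false) then
            PySem.List.pySetD g i (PySem.List.pySetD (PySem.List.pyGetD g i []) j true)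
          else g) g) (Tf R C (initA R C))
      = Tf R C (FkA R C P k) := by
  intro k
  induction k with
  | zero =>
    intro _
    simp only [List.range_zero, List.map_nil, List.foldl_nil]
    apply Tf_congr; intro i hi j hj
    unfold FkA initA
    split_ifs with h1
    · rw [gs_false_row (by omega)]
      exact decide_eq_false (by omega)
    · rfl
  | succ k ih =>
    intro hk
    rw [List.range_succ, List.map_append, List.foldl_append, ih (by omega)]
    simp only [List.map_cons, List.map_nil, List.foldl_cons, List.foldl_nil]
    have hA := A_inner R C P hC (R - 1 - k) (by omega) (FkA R C P k)
      (by intro j hj; unfold FkA; rw [if_pos (by omega)])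
      (by intro j hj; unfold FkA initA; rw [if_neg (by omega)])
      C (le_refl C)
    rw [hA]
    apply Tf_congr; intro i' hi' j hj
    unfold updA FkA initA
    split_ifs with h1 h2 h2 <;> first | rfl | omega

theorem dict_contains_eq (off_limits : List (List Int)) (i j : Int) :
    (off_limits.foldl
        (fun d ol => d.insert (PySem.List.pyGetD ol 0 0, PySem.List.pyGetD ol 1 0) 1)
        (PySem.Dict.empty : PySem.Dict (Int × Int) Int)).contains (i, j)
      = Pf off_limits i j := by
  have hkeys : (off_limits.foldl
      (fun d ol => d.insert (PySem.List.pyGetD ol 0 0, PySem.List.pyGetD ol 1 0) 1)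
      (PySem.Dict.empty : PySem.Dict (Int × Int) Int)).keys
      = PySem.Set.ofList (off_limits.map keyOf) :=
    PySem.Dict.keys_foldl_insert_key off_limits keyOf (fun _ _ => 1) PySem.Dict.empty
  have h1 := PySem.Dict.contains_iff_mem_keys (off_limits.foldl
      (fun d ol => d.insert (PySem.List.pyGetD ol 0 0, PySem.List.pyGetD ol 1 0) 1)
      (PySem.Dict.empty : PySem.Dict (Int × Int) Int)) (i, j)
  rw [hkeys, PySem.Set.mem_ofList] at h1
  unfold Pf
  by_cases hm : (i, j) ∈ off_limits.map keyOf
  · rw [h1.mpr hm, decide_eq_true hm]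
  · rw [decide_eq_false hm]
    exact Bool.eq_false_iff.mpr (fun hc => hm (h1.mp hc))

theorem portA_eq (R C : ℕ) (hR : 1 ≤ R) (hC : 1 ≤ C) (off_limits : List (List Int)) :
    genorateBoolGrid (R : Int) (C : Int) off_limits = Tf R C (gridSpec R C (Pf off_limits)) := by
  simp only [genorateBoolGrid]
  have hrep : PySem.List.pyRepeat [false] ((C : Int) + 1) = List.replicate (C + 1) false := by
    rw [PySem.List.pyRepeat_singleton]; congr 1 <;> omega
  have hgrid0 : (PySem.List.pyRange 0 ((R : Int) + 1) 1).map
      (fun _ => PySem.List.pyRepeat [false] ((C : Int) + 1)) = Tf R C (fun _ _ => false) := by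
    rw [hrep, List.map_const', PySem.List.length_pyRange_one]
    have hlen : (((R : Int) + 1) - 0).toNat = R + 1 := by omega
    rw [hlen, Tf]
    apply List.ext_getElem
    · simp
    · intro i h1 h2
      simp
  rw [hgrid0]
  simp only [pyRange_countdown]
  have hRm : (R : Int) - 1 = ((R - 1 : ℕ) : Int) := by omega
  have hCm : (C : Int) - 1 = ((C - 1 : ℕ) : Int) := by omega
  rw [hRm, hCm, Tf_write (by omega) (by omega)]
  have hinit : Tf R C (fun i' j' => if i' = R - 1 ∧ j' = C - 1 then true else false)
      = Tf R C (initA R C) := by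
    apply Tf_congr; intro i hi j hj
    unfold initA
    split_ifs with h1
    · exact (decide_eq_true h1).symm
    · exact (decide_eq_false h1).symm
  rw [hinit]
  simp only [dict_contains_eq]
  exact A_outer R C (Pf off_limits) hR hC R (le_refl R) |>.trans (by
    apply Tf_congr; intro i hi j hj
    unfold FkA
    rw [if_pos (by omega)])

-- ==== B side: the DFS worklist marks exactly the gridSpec-true cells ====

def Poff (off : PySem.Set (Int × Int)) : Int → Int → Bool := fun a b => off.contains (a, b)

-- gridSpec at an Int point
def gsI (R C : ℕ) (P : Int → Int → Bool) (p : Int × Int) : Bool :=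
  gridSpec R C P p.1.toNat p.2.toNat

def GoodCell (R C : ℕ) (P : Int → Int → Bool) (p : Int × Int) : Prop :=
  0 ≤ p.1 ∧ p.1 < (R : Int) ∧ 0 ≤ p.2 ∧ p.2 < (C : Int) ∧ gsI R C P p = true

-- a marked cell all of whose in-bounds, unblocked predecessors are marked
def ClosedAt (off seen : PySem.Set (Int × Int)) (q : Int × Int) : Prop :=
  ∀ p ∈ [(q.1 - 1, q.2), (q.1, q.2 - 1)],
    0 ≤ p.1 → 0 ≤ p.2 → off.contains p = false → p ∈ seen

def DfsInv (R C : ℕ) (off : PySem.Set (Int × Int)) (fuel : ℕ)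
    (seen : PySem.Set (Int × Int)) (stack : List (Int × Int)) : Prop :=
  (∀ p ∈ stack, p ∈ seen) ∧
  (∀ p ∈ seen, GoodCell R C (Poff off) p) ∧
  ((R : Int) - 1, (C : Int) - 1) ∈ seen ∧
  (∀ q ∈ seen, q ∉ stack → ClosedAt off seen q) ∧
  seen.Nodup ∧
  R * C + stack.length ≤ fuel + seen.length

theorem gsI_seed (R C : ℕ) (P : Int → Int → Bool) (hR : 1 ≤ R) (hC : 1 ≤ C) :
    gsI R C P ((R : Int) - 1, (C : Int) - 1) = true := by
  unfold gsI
  have h1 : ((R : Int) - 1).toNat = R - 1 := by omega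
  have h2 : ((C : Int) - 1).toNat = C - 1 := by omega
  rw [h1, h2]
  exact gs_seed hR hC

theorem gsI_step (R C : ℕ) (P : Int → Int → Bool) (p : Int × Int)
    (h1 : 0 ≤ p.1) (h2 : p.1 < (R : Int)) (h3 : 0 ≤ p.2) (h4 : p.2 < (C : Int))
    (hns : ¬(p.1 = (R : Int) - 1 ∧ p.2 = (C : Int) - 1)) :
    gsI R C P p
      = (!P p.1 p.2 && (gsI R C P (p.1 + 1, p.2) || gsI R C P (p.1, p.2 + 1))) := by
  unfold gsI
  have hi : p.1.toNat < R := by omega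
  have hj : p.2.toNat < C := by omega
  have hns' : ¬(p.1.toNat = R - 1 ∧ p.2.toNat = C - 1) := by omega
  rw [gs_step hi hj hns']
  have e1 : ((p.1.toNat : ℕ) : Int) = p.1 := by omega
  have e2 : ((p.2.toNat : ℕ) : Int) = p.2 := by omega
  have e3 : (p.1 + 1).toNat = p.1.toNat + 1 := by omega
  have e4 : (p.2 + 1).toNat = p.2.toNat + 1 := by omega
  rw [e1, e2]
  simp [e3, e4]

theorem card_le_grid (R C : ℕ) (seen : List (Int × Int)) (hnd : seen.Nodup)
    (hb : ∀ p ∈ seen, 0 ≤ p.1 ∧ p.1 < (R : Int) ∧ 0 ≤ p.2 ∧ p.2 < (C : Int)) :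
    seen.length ≤ R * C := by
  have h1 : seen.toFinset.card = seen.length := List.toFinset_card_of_nodup hnd
  have h2 : seen.toFinset ⊆ (Finset.Ico (0:Int) (R:Int)) ×ˢ (Finset.Ico (0:Int) (C:Int)) := by
    intro p hp
    rw [List.mem_toFinset] at hp
    obtain ⟨a1, a2, a3, a4⟩ := hb p hp
    rw [Finset.mem_product, Finset.mem_Ico, Finset.mem_Ico]
    exact ⟨⟨a1, a2⟩, ⟨a3, a4⟩⟩
  have h3 := Finset.card_le_card h2
  rw [Finset.card_product, Int.card_Ico, Int.card_Ico] at h3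
  simp only [Int.sub_zero, Int.toNat_natCast] at h3
  omega

theorem set_contains_eq (off_limits : List (List Int)) (i j : Int) :
    (PySem.Set.ofList (off_limits.map
        (fun o => (PySem.List.pyGetD o 0 0, PySem.List.pyGetD o 1 0)))).contains (i, j)
      = Pf off_limits i j := by
  have hmap : off_limits.map (fun o => (PySem.List.pyGetD o 0 0, PySem.List.pyGetD o 1 0))
      = off_limits.map keyOf := rfl
  rw [hmap]
  have h1 := PySem.Set.contains_iff (PySem.Set.ofList (off_limits.map keyOf)) (i, j)
  rw [PySem.Set.mem_ofList] at h1
  unfold Pf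
  by_cases hm : (i, j) ∈ off_limits.map keyOf
  · rw [h1.mpr hm, decide_eq_true hm]
  · rw [decide_eq_false hm]
    exact Bool.eq_false_iff.mpr (fun hc => hm (h1.mp hc))

-- a predecessor of a reachable cell, in bounds and unblocked, is reachable
theorem good_pred (R C : ℕ) (off : PySem.Set (Int × Int)) (q p : Int × Int)
    (hGq : GoodCell R C (Poff off) q)
    (hpred : q = (p.1 + 1, p.2) ∨ q = (p.1, p.2 + 1))
    (h01 : 0 ≤ p.1) (h02 : 0 ≤ p.2) (hoff : off.contains p = false) :
    GoodCell R C (Poff off) p := by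
  obtain ⟨b1, b2, b3, b4, bg⟩ := hGq
  have hb : p.1 < (R : Int) ∧ p.2 < (C : Int) := by
    rcases hpred with rfl | rfl <;> dsimp only at b2 b4 <;> exact ⟨by omega, by omega⟩
  refine ⟨h01, hb.1, h02, hb.2, ?_⟩
  have hns : ¬(p.1 = (R : Int) - 1 ∧ p.2 = (C : Int) - 1) := by
    rcases hpred with rfl | rfl <;> dsimp only at b2 b4 <;> omega
  rw [gsI_step R C (Poff off) p h01 hb.1 h02 hb.2 hns]
  have hP : Poff off p.1 p.2 = false := by
    unfold Poff; exact hoff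
  rw [hP]
  rcases hpred with rfl | rfl
  · rw [bg]; rfl
  · rw [bg]; simp

-- one execution of the loop body of "for p in (preds): if …: add/append" preserves the
-- mid-step invariant (q is the popped cell, whose closure is established afterwards)
theorem visit_pres (R C : ℕ) (off : PySem.Set (Int × Int)) (q p : Int × Int)
    (seen : PySem.Set (Int × Int)) (stack : List (Int × Int))
    (hq : q ∈ seen)
    (hpred : q = (p.1 + 1, p.2) ∨ q = (p.1, p.2 + 1))
    (hA : ∀ x ∈ stack, x ∈ seen)
    (hB : ∀ x ∈ seen, GoodCell R C (Poff off) x)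
    (hD : ∀ x ∈ seen, x ∉ stack → x = q ∨ ClosedAt off seen x)
    (hE : seen.Nodup) :
    (∀ x ∈ (pvVisit off (seen, stack) p).2, x ∈ (pvVisit off (seen, stack) p).1) ∧
    (∀ x ∈ (pvVisit off (seen, stack) p).1, GoodCell R C (Poff off) x) ∧
    (∀ x ∈ (pvVisit off (seen, stack) p).1, x ∉ (pvVisit off (seen, stack) p).2 →
        x = q ∨ ClosedAt off (pvVisit off (seen, stack) p).1 x) ∧
    (pvVisit off (seen, stack) p).1.Nodup ∧
    (∀ x ∈ seen, x ∈ (pvVisit off (seen, stack) p).1) ∧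
    (pvVisit off (seen, stack) p).2.length + seen.length
        = stack.length + (pvVisit off (seen, stack) p).1.length ∧
    (∀ x ∈ stack, x ∈ (pvVisit off (seen, stack) p).2) ∧
    (0 ≤ p.1 → 0 ≤ p.2 → off.contains p = false → p ∈ (pvVisit off (seen, stack) p).1) := by
  unfold pvVisit
  by_cases hcond : (decide (0 ≤ p.1) && decide (0 ≤ p.2) && !off.contains p
      && !PySem.Set.contains seen p) = true
  · rw [if_pos hcond]
    have hcond' := hcond
    simp only [Bool.and_eq_true, Bool.not_eq_true', decide_eq_true_eq] at hcond'
    obtain ⟨⟨⟨h01, h02⟩, hoff⟩, hsc⟩ := hcond'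
    have hpnot : p ∉ seen := fun hm => by
      rw [(PySem.Set.contains_iff seen p).mpr hm] at hsc
      exact absurd hsc (by simp)
    rw [PySem.Set.add_of_not_mem hpnot]
    dsimp only
    have hGp : GoodCell R C (Poff off) p := good_pred R C off q p (hB q hq) hpred h01 h02 hoff
    refine ⟨?_, ?_, ?_, ?_, ?_, ?_, ?_, ?_⟩
    · intro x hx
      rcases List.mem_append.mp hx with h | h
      · exact List.mem_append_left _ (hA x h)
      · exact List.mem_append_right _ h
    · intro x hx
      rcases List.mem_append.mp hx with h | h
      · exact hB x h
      · rw [List.mem_singleton] at h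
        rw [h]; exact hGp
    · intro x hx hxs
      have hxp : x ≠ p := fun he => hxs (List.mem_append_right _ (by simp [he]))
      have hx' : x ∈ seen := by
        rcases List.mem_append.mp hx with h | h
        · exact h
        · rw [List.mem_singleton] at h; exact absurd h hxp
      have hxs' : x ∉ stack := fun hm => hxs (List.mem_append_left _ hm)
      rcases hD x hx' hxs' with h | h
      · exact Or.inl h
      · refine Or.inr ?_
        intro p' hp' a1 a2 a3
        exact List.mem_append_left _ (h p' hp' a1 a2 a3)
    · exact hE.append (List.nodup_singleton p)
        (fun a ha hb => by rw [List.mem_singleton] at hb; rw [hb] at ha; exact hpnot ha)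
    · intro x hx; exact List.mem_append_left _ hx
    · simp only [List.length_append, List.length_cons, List.length_nil]; omega
    · intro x hx; exact List.mem_append_left _ hx
    · intro _ _ _; exact List.mem_append_right _ (by simp)
  · rw [if_neg hcond]
    dsimp only
    refine ⟨hA, hB, hD, hE, fun x hx => hx, rfl, fun x hx => hx, ?_⟩
    intro h1 h2 h3
    by_contra hns
    apply hcond
    simp only [Bool.and_eq_true, Bool.not_eq_true', decide_eq_true_eq]
    exact ⟨⟨⟨h1, h2⟩, h3⟩,
      Bool.eq_false_iff.mpr (fun hc => hns ((PySem.Set.contains_iff _ _).mp hc))⟩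

theorem dfs_step (R C : ℕ) (off : PySem.Set (Int × Int)) (fuel : ℕ)
    (seen : PySem.Set (Int × Int)) (stack' : List (Int × Int)) (q : Int × Int)
    (hInv : DfsInv R C off (fuel + 1) seen (stack' ++ [q])) :
    DfsInv R C off fuel
      ([(q.1 - 1, q.2), (q.1, q.2 - 1)].foldl (pvVisit off) (seen, stack')).1
      ([(q.1 - 1, q.2), (q.1, q.2 - 1)].foldl (pvVisit off) (seen, stack')).2 := by
  obtain ⟨hA, hB, hC0, hD, hE, hF⟩ := hInv
  have hq : q ∈ seen := hA q (List.mem_append_right _ (by simp))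
  have hA' : ∀ x ∈ stack', x ∈ seen := fun x hx => hA x (List.mem_append_left _ hx)
  have hD' : ∀ x ∈ seen, x ∉ stack' → x = q ∨ ClosedAt off seen x := by
    intro x hx hxs
    by_cases hxq : x = q
    · exact Or.inl hxq
    · refine Or.inr (hD x hx ?_)
      intro hm
      rcases List.mem_append.mp hm with h | h
      · exact hxs h
      · rw [List.mem_singleton] at h; exact hxq h
  have hpred1 : q = ((q.1 - 1, q.2).1 + 1, (q.1 - 1, q.2).2)
      ∨ q = ((q.1 - 1, q.2).1, (q.1 - 1, q.2).2 + 1) := by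
    left; dsimp only
    rw [show q.1 - 1 + 1 = q.1 from by ring]
  have hpred2 : q = ((q.1, q.2 - 1).1 + 1, (q.1, q.2 - 1).2)
      ∨ q = ((q.1, q.2 - 1).1, (q.1, q.2 - 1).2 + 1) := by
    right; dsimp only
    rw [show q.2 - 1 + 1 = q.2 from by ring]
  obtain ⟨A1, B1, D1, E1, M1, L1, S1, P1⟩ :=
    visit_pres R C off q (q.1 - 1, q.2) seen stack' hq hpred1 hA' hB hD' hE
  obtain ⟨A2, B2, D2, E2, M2, L2, S2, P2⟩ :=
    visit_pres R C off q (q.1, q.2 - 1)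
      (pvVisit off (seen, stack') (q.1 - 1, q.2)).1
      (pvVisit off (seen, stack') (q.1 - 1, q.2)).2
      (M1 q hq) hpred2 A1 B1 D1 E1
  have hfold : [(q.1 - 1, q.2), (q.1, q.2 - 1)].foldl (pvVisit off) (seen, stack')
      = pvVisit off ((pvVisit off (seen, stack') (q.1 - 1, q.2)).1,
                     (pvVisit off (seen, stack') (q.1 - 1, q.2)).2) (q.1, q.2 - 1) := rfl
  rw [hfold]
  refine ⟨A2, B2, M2 _ (M1 _ hC0), ?_, E2, ?_⟩
  · intro x hx hxs
    rcases D2 x hx hxs with h | h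
    · subst h
      intro p' hp' a1 a2 a3
      rcases List.mem_cons.mp hp' with h' | h'
      · rw [h'] at a1 a2 a3 ⊢
        exact M2 _ (P1 a1 a2 a3)
      · rw [List.mem_singleton] at h'
        rw [h'] at a1 a2 a3 ⊢
        exact P2 a1 a2 a3
    · exact h
  · simp only [List.length_append, List.length_cons, List.length_nil] at hF
    omega

theorem dfs_post (R C : ℕ) (off : PySem.Set (Int × Int)) :
    ∀ (fuel : ℕ) (seen : PySem.Set (Int × Int)) (stack : List (Int × Int)),
      DfsInv R C off fuel seen stack →
      (∀ p ∈ pvDfs off fuel seen stack, GoodCell R C (Poff off) p) ∧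
      ((R : Int) - 1, (C : Int) - 1) ∈ pvDfs off fuel seen stack ∧
      (∀ q ∈ pvDfs off fuel seen stack, ClosedAt off (pvDfs off fuel seen stack) q) := by
  intro fuel
  induction fuel with
  | zero =>
    intro seen stack hInv
    obtain ⟨hA, hB, hC0, hD, hE, hF⟩ := hInv
    have hcard : seen.length ≤ R * C :=
      card_le_grid R C seen hE (fun p hp => by
        obtain ⟨a1, a2, a3, a4, -⟩ := hB p hp; exact ⟨a1, a2, a3, a4⟩)
    have hstack : stack = [] := List.eq_nil_of_length_eq_zero (by omega)
    subst hstack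
    exact ⟨hB, hC0, fun q hq => hD q hq (List.not_mem_nil)⟩
  | succ fuel ih =>
    intro seen stack hInv
    match hlast : stack.getLast? with
    | none =>
      have hstack : stack = [] := List.getLast?_eq_none_iff.mp hlast
      subst hstack
      obtain ⟨hA, hB, hC0, hD, hE, hF⟩ := hInv
      simp only [pvDfs]
      exact ⟨hB, hC0, fun q hq => hD q hq (List.not_mem_nil)⟩
    | some q =>
      obtain ⟨l', rfl⟩ := List.getLast?_eq_some_iff.mp hlast
      have hdrop : (l' ++ [q]).dropLast = l' := List.dropLast_concat
      have hstep := dfs_step R C off fuel seen l' q hInv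
      have hrw : pvDfs off (fuel + 1) seen (l' ++ [q])
          = pvDfs off fuel
              ([(q.1 - 1, q.2), (q.1, q.2 - 1)].foldl (pvVisit off) (seen, l')).1
              ([(q.1 - 1, q.2), (q.1, q.2 - 1)].foldl (pvVisit off) (seen, l')).2 := by
        simp only [pvDfs, hlast, hdrop]
      rw [hrw]
      exact ih _ _ hstep

theorem dfs_complete (R C : ℕ) (off s : PySem.Set (Int × Int)) (hR : 1 ≤ R) (hC : 1 ≤ C)
    (hdest : ((R : Int) - 1, (C : Int) - 1) ∈ s)
    (hcl : ∀ q ∈ s, ClosedAt off s q) :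
    ∀ i j : ℕ, i < R → j < C → gridSpec R C (Poff off) i j = true → ((i : Int), (j : Int)) ∈ s := by
  suffices H : ∀ n, ∀ i j : ℕ, i < R → j < C → (R - i) + (C - j) ≤ n →
      gridSpec R C (Poff off) i j = true → ((i : Int), (j : Int)) ∈ s by
    intro i j hi hj hg
    exact H ((R - i) + (C - j)) i j hi hj (le_refl _) hg
  intro n
  induction n with
  | zero => intro i j hi hj hn; omega
  | succ n ih =>
    intro i j hi hj hn hg
    by_cases hd : i = R - 1 ∧ j = C - 1
    · have e1 : ((i : ℕ) : Int) = (R : Int) - 1 := by omega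
      have e2 : ((j : ℕ) : Int) = (C : Int) - 1 := by omega
      rw [e1, e2]
      exact hdest
    · rw [gs_step hi hj hd] at hg
      simp only [Bool.and_eq_true, Bool.or_eq_true, Bool.not_eq_true'] at hg
      obtain ⟨hP, hor⟩ := hg
      have hoffp : off.contains ((i : Int), (j : Int)) = false := hP
      rcases hor with h | h
      · have hi1 : i + 1 < R := by
          by_contra hc
          rw [gs_false_row (by omega)] at h
          exact absurd h (by simp)
        have hmem := ih (i + 1) j hi1 hj (by omega) h
        have hcl' := hcl _ hmem
        have e1 : (((i + 1 : ℕ) : Int), (j : Int)).1 - 1 = (i : Int) := by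
          dsimp only; omega
        have hmm : ((i : Int), (j : Int)) ∈
            [((((i + 1 : ℕ) : Int), (j : Int)).1 - 1, (((i + 1 : ℕ) : Int), (j : Int)).2),
             ((((i + 1 : ℕ) : Int), (j : Int)).1, (((i + 1 : ℕ) : Int), (j : Int)).2 - 1)] := by
          rw [e1]; exact List.mem_cons_self
        exact hcl' _ hmm (by omega) (by omega) hoffp
      · have hj1 : j + 1 < C := by
          by_contra hc
          rw [gs_false_col (by omega)] at h
          exact absurd h (by simp)
        have hmem := ih i (j + 1) hi hj1 (by omega) h
        have hcl' := hcl _ hmem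
        have e1 : (((i : ℕ) : Int), ((j + 1 : ℕ) : Int)).2 - 1 = (j : Int) := by
          dsimp only; omega
        have hmm : ((i : Int), (j : Int)) ∈
            [((((i : ℕ) : Int), ((j + 1 : ℕ) : Int)).1 - 1, (((i : ℕ) : Int), ((j + 1 : ℕ) : Int)).2),
             ((((i : ℕ) : Int), ((j + 1 : ℕ) : Int)).1, (((i : ℕ) : Int), ((j + 1 : ℕ) : Int)).2 - 1)] := by
          refine List.mem_cons.mpr (Or.inr ?_)
          rw [e1]
          exact List.mem_singleton.mpr (by
            have : ((j + 1 : ℕ) : Int) = (j : Int) + 1 := by omega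
            rfl)
        exact hcl' _ hmm (by omega) (by omega) hoffp

theorem portB_eq (R C : ℕ) (hR : 1 ≤ R) (hC : 1 ≤ C) (off_limits : List (List Int)) :
    genorateBoolGrid_alt (R : Int) (C : Int) off_limits
      = Tf R C (gridSpec R C (Pf off_limits)) := by
  simp only [genorateBoolGrid_alt]
  rw [if_pos (show (0 : Int) < (R : Int) ∧ (0 : Int) < (C : Int) from ⟨by omega, by omega⟩)]
  have hPeq : Poff (PySem.Set.ofList (off_limits.map
      (fun o => (PySem.List.pyGetD o 0 0, PySem.List.pyGetD o 1 0)))) = Pf off_limits := by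
    funext a b
    exact set_contains_eq off_limits a b
  set offS : PySem.Set (Int × Int) := PySem.Set.ofList (off_limits.map
      (fun o => (PySem.List.pyGetD o 0 0, PySem.List.pyGetD o 1 0))) with hoffS
  have htn : ((R : Int)).toNat * ((C : Int)).toNat = R * C := by
    rw [Int.toNat_natCast, Int.toNat_natCast]
  rw [htn]
  have hadd : PySem.Set.add (PySem.Set.empty : PySem.Set (Int × Int)) ((R : Int) - 1, (C : Int) - 1)
      = [((R : Int) - 1, (C : Int) - 1)] := rfl
  rw [hadd]
  have hInv : DfsInv R C offS (R * C)
      [((R : Int) - 1, (C : Int) - 1)] [((R : Int) - 1, (C : Int) - 1)] := by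
    refine ⟨fun p hp => hp, ?_, List.mem_singleton.mpr rfl, ?_, List.nodup_singleton _, ?_⟩
    · intro p hp
      rw [List.mem_singleton] at hp
      rw [hp]
      exact ⟨by omega, by omega, by omega, by omega, gsI_seed R C _ hR hC⟩
    · intro q hq hqs
      rw [List.mem_singleton] at hq
      exact absurd (List.mem_singleton.mpr hq) hqs
    · simp
  obtain ⟨hsound, hdest, hclosed⟩ := dfs_post R C offS (R * C) _ _ hInv
  set s := pvDfs offS (R * C) [((R : Int) - 1, (C : Int) - 1)] [((R : Int) - 1, (C : Int) - 1)]
    with hs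
  have hchar : ∀ i j : ℕ, i < R → j < C →
      s.contains ((i : Int), (j : Int)) = gridSpec R C (Pf off_limits) i j := by
    intro i j hi hj
    rw [← hPeq]
    by_cases hg : gridSpec R C (Poff offS) i j = true
    · rw [hg]
      exact (PySem.Set.contains_iff _ _).mpr (dfs_complete R C offS s hR hC hdest hclosed i j hi hj hg)
    · rw [Bool.not_eq_true] at hg
      rw [hg]
      rw [Bool.eq_false_iff]
      intro hc
      have hmem := (PySem.Set.contains_iff _ _).mp hc
      obtain ⟨-, -, -, -, hgood⟩ := hsound _ hmem
      unfold gsI at hgood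
      rw [Int.toNat_natCast, Int.toNat_natCast] at hgood
      exact absurd hgood (by rw [hg]; simp)
  -- assemble the grid
  rw [PySem.List.pyRange_zero_nat, PySem.List.pyRange_zero_nat, List.map_map]
  have hrep : PySem.List.pyRepeat [false] ((C : Int) + 1) = List.replicate (C + 1) false := by
    rw [PySem.List.pyRepeat_singleton]; congr 1 <;> omega
  rw [hrep]
  have hlast : List.replicate (C + 1) false
      = (List.range (C + 1)).map (fun j => gridSpec R C (Pf off_limits) R j) := by
    apply List.ext_getElem
    · simp
    · intro j h1 h2
      simp only [List.getElem_replicate, List.getElem_map, List.getElem_range]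
      rw [gs_false_row (le_refl R)]
  rw [hlast, Tf, show List.range (R + 1) = List.range R ++ [R] from List.range_succ,
    List.map_append, List.map_cons, List.map_nil]
  congr 1
  apply rmap_congr; intro i hi
  simp only [Function.comp_apply, List.map_map]
  rw [show List.range (C + 1) = List.range C ++ [C] from List.range_succ,
    List.map_append, List.map_cons, List.map_nil]
  congr 1
  · apply rmap_congr; intro j hj
    simp only [Function.comp_apply]
    exact hchar i j hi hj
  · rw [gs_false_col (le_refl C)]

-- ==== degenerate grids (r = 0 or c = 0): closed forms of both ports ====
theorem pySetD_singleton_neg_one {α : Type} (x v : α) : PySem.List.pySetD [x] (-1) v = [v] := by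
  simp [PySem.List.pySetD, PySem.List.pySet?, PySem.List.pyIdx?]

theorem pyGetD_singleton_neg_one {α : Type} (x d : α) : PySem.List.pyGetD [x] (-1) d = x := by
  simp [PySem.List.pyGetD, PySem.List.pyGet?, PySem.List.pyIdx?]

theorem A_r0 (c : Int) (hc : 0 ≤ c) (off_limits : List (List Int)) :
    genorateBoolGrid 0 c off_limits
      = [PySem.List.pySetD (List.replicate (c.toNat + 1) false) (c - 1) true] := by
  simp only [genorateBoolGrid]
  rw [show (0 : Int) + 1 = 0 + 1 from rfl, PySem.List.pyRange_one_singleton 0]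
  simp only [List.map_cons, List.map_nil]
  rw [show PySem.List.pyRepeat [false] (c + 1) = List.replicate (c.toNat + 1) false from by
    rw [PySem.List.pyRepeat_singleton]; congr 1 <;> omega]
  rw [show (0 : Int) - 1 = -1 from rfl, pyGetD_singleton_neg_one, pySetD_singleton_neg_one]
  rw [PySem.List.pyRange_neg_one_eq_nil (by omega : (-1 : Int) ≤ -1), List.foldl_nil]

theorem B_r0 (c : Int) (hc : 0 ≤ c) (off_limits : List (List Int)) :
    genorateBoolGrid_alt 0 c off_limits = [List.replicate (c.toNat + 1) false] := by
  simp only [genorateBoolGrid_alt]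
  rw [if_neg (by omega : ¬((0:Int) < 0 ∧ 0 < c))]
  rw [PySem.List.pyRange_one_eq_nil (le_refl (0:Int)), List.map_nil, List.nil_append]
  rw [show PySem.List.pyRepeat [false] (c + 1) = List.replicate (c.toNat + 1) false from by
    rw [PySem.List.pyRepeat_singleton]; congr 1 <;> omega]

theorem A_c0 (r : Int) (hr : 1 ≤ r) (off_limits : List (List Int)) :
    genorateBoolGrid r 0 off_limits
      = (List.replicate (r.toNat + 1) [false]).set (r.toNat - 1) [true] := by
  simp only [genorateBoolGrid]
  rw [(by norm_num : ((0 : Int) - 1) = -1)]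
  rw [show PySem.List.pyRepeat [false] ((0 : Int) + 1) = [false] from rfl]
  rw [List.map_const', PySem.List.length_pyRange_one,
    show ((r + 1) - 0).toNat = r.toNat + 1 from by omega]
  rw [PySem.List.pyGetD_eq_getElem _ _ (by omega) (by simp only [List.length_replicate]; omega), List.getElem_replicate,
    pySetD_singleton_neg_one, PySem.List.pySetD_of_nonneg _ _ (by omega : 0 ≤ r - 1),
    show (r - 1).toNat = r.toNat - 1 from by omega]
  rw [PySem.List.pyRange_neg_one_eq_nil (by omega : (-1 : Int) ≤ -1)]
  simp only [List.foldl_nil]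
  exact List.foldl_fixed _

theorem B_c0 (r : Int) (hr : 0 ≤ r) (off_limits : List (List Int)) :
    genorateBoolGrid_alt r 0 off_limits = List.replicate (r.toNat + 1) [false] := by
  simp only [genorateBoolGrid_alt]
  rw [if_neg (by omega : ¬((0:Int) < r ∧ (0:Int) < 0))]
  rw [show PySem.List.pyRange 0 (0:Int) 1 = [] from PySem.List.pyRange_one_eq_nil (le_refl (0:Int))]
  simp only [List.map_nil, List.nil_append]
  rw [show PySem.List.pyRepeat [false] ((0 : Int) + 1) = [false] from rfl]
  rw [List.map_const', PySem.List.length_pyRange_one, show ((r - 0)).toNat = r.toNat from by omega]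
  rw [← List.replicate_succ']

-- ===== VERDICT (by name: the statement is the Claim_ definition above) =====
theorem genorateBoolGrid_spec : Claim_unchanged_genorateBoolGrid := by
  intro r c off_limits _ hpre
  intro hD
  obtain ⟨hr0, hc0, -⟩ := hpre
  have hr : r = ((r.toNat : ℕ) : Int) := by omega
  have hc : c = ((c.toNat : ℕ) : Int) := by omega
  have hR : 1 ≤ r.toNat := by unfold D_genorateBoolGrid at hD; omega
  have hC : 1 ≤ c.toNat := by unfold D_genorateBoolGrid at hD; omega
  rw [hr, hc, portA_eq _ _ hR hC, portB_eq _ _ hR hC]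

theorem genorateBoolGrid_changed : Claim_changed_genorateBoolGrid := by
  unfold Claim_changed_genorateBoolGrid; decide

theorem genorateBoolGrid_tight : Claim_exact_genorateBoolGrid := by
  intro r c off_limits _ hpre hD heq
  obtain ⟨hr0, hc0, -⟩ := hpre
  by_cases hr : r = 0
  · subst hr
    rw [A_r0 c hc0 off_limits, B_r0 c hc0 off_limits] at heq
    simp only [List.cons.injEq, and_true] at heq
    by_cases hc : c = 0
    · subst hc
      exact absurd heq (by decide)
    · rw [PySem.List.pySetD_of_nonneg _ _ (by omega : 0 ≤ c - 1),
        show (c - 1).toNat = c.toNat - 1 from by omega] at heq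
      have hL : ((List.replicate (c.toNat + 1) false).set (c.toNat - 1) true).getD
          (c.toNat - 1) false = true := by
        rw [List.getD_eq_getElem _ _ (by simp)]
        simp [List.getElem_set]
      rw [heq, List.getD_eq_getElem _ _ (by simp), List.getElem_replicate] at hL
      simp at hL
  · have hc : c = 0 := by rcases hD with h | h; exact absurd h hr; exact h
    subst hc
    rw [A_c0 r (by omega) off_limits, B_c0 r hr0 off_limits] at heq
    have hL : ((List.replicate (r.toNat + 1) ([false])).set (r.toNat - 1) [true]).getD
        (r.toNat - 1) [] = [true] := by
      rw [List.getD_eq_getElem _ _ (by simp)]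
      simp [List.getElem_set]
    rw [heq, List.getD_eq_getElem _ _ (by simp), List.getElem_replicate] at hL
    simp at hL
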